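-- pv_equiv track=rewrite | github.com/kig132/Python-Projects | lab6.py | expression_formula
-- ===== SOURCE A (Python) =====
-- def expression_formula(expr_coeffs, expr_molecs):
--     """
--     (tuple (of ints), tuple (of dictionaries)) -> dictionary
--
--     Calculate the total number of atoms of each element in a chemical expression.
--
--     Parameters
--     ----------
--     expr_coeffs : tuple
--         A tuple containing integers that represent the coefficients for molecules
--         within the expression. The order of the coefficients correspond to the order
--         of molecule dictionaries.
--     expr_molecs : tuple
--         A tuple containing dictionaries that define the molecules within the expression.
--         The molecule dictionaries have the form {'atomic symbol' : number of atoms}.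
--         The order of the coefficients correspond to the order of molecule dictionaries.
--
--     Returns
--     -------
--     dictionary
--         A dictionary containing all elements within the expression as keys and the
--         corresponding number of atoms for each element within the expression as values.
--
--     Examples
--     --------
--
--     >>> # expression: 2NaCl + H2 + 5NaF
--     >>> expression_formula((2,1,5), ({"Na":1, "Cl":1}, {"H":2}, {"Na":1, "F":1}))
--     {'Na': 7, 'Cl': 2, 'H': 2, 'F': 5}
--
--     """
--     ## To Do: Complete the function
--     '''
--     dict = {}
--
--     for i in range(len(expr_molecs)):
--         for f_dict in expr_molecs[i]:
--             for key, value in f_dict.items():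
--                 if key in dict.keys():
--                     dict.update({key : dict[key] + value * expr_coeffs[i]})
--                 else:
--                     dict.update({key : value * expr_coeffs[i]})
--
--     return dict
--     '''
--
--     dict = {}
--
--     for i in range(len(expr_molecs)):
--         for key, value in expr_molecs[i].items():
--             if key in dict.keys():
--                 dict.update({key : (dict[key]) + value * expr_coeffs[i]})
--             else:
--                 dict[key] = (value) * expr_coeffs[i]
--                 #dict.update{key : value * expr_coeffs[i]})
--
--     return dict
-- ===== SOURCE B (Python) =====
-- def expression_formula(expr_coeffs, expr_molecs):
--     elems = dict.fromkeys(k for m in expr_molecs for k in m)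
--     return {e: sum(m.get(e, 0) * c for c, m in zip(expr_coeffs, expr_molecs))
--             for e in elems}
-- ===== Notes on version B (the rewrite author's own statement) =====
-- stated objective: idiomatic
-- what changed: A interleaves accumulation into a growing dict inside an index loop; B first collects the distinct element symbols in first-appearance order with dict.fromkeys, then computes each element's total by one per-element scan over zip(expr_coeffs, expr_molecs) in a dict comprehension.
import Mathlib
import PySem

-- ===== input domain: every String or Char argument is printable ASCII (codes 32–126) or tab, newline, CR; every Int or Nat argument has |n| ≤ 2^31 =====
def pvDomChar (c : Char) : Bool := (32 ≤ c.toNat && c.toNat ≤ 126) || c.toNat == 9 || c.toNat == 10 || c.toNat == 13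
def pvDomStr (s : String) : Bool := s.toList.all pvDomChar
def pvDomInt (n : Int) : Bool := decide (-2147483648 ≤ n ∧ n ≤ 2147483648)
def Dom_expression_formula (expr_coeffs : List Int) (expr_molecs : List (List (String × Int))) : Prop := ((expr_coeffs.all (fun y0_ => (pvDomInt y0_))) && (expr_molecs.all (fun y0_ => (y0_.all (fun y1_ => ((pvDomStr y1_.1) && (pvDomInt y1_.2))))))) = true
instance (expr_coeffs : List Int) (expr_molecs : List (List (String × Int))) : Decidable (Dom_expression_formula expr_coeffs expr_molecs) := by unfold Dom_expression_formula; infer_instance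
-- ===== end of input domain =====

-- B replaces A's interleaved index-loop accumulation by a dict.fromkeys key pass
-- followed by one per-element sum over zip(expr_coeffs, expr_molecs) (objective: idiomatic).

-- ===== PORT A =====
-- dict = {}; for i in range(len(expr_molecs)): for key, value in expr_molecs[i].items(): …
-- (pyGetD defaults are never reached: i ranges over the molecule indices and Pre_ keeps
-- expr_coeffs at least as long as expr_molecs)
def expression_formula (expr_coeffs : List Int) (expr_molecs : List (List (String × Int))) : List (String × Int) :=
  ((PySem.List.pyRange 0 expr_molecs.length 1).foldl
    (fun d i =>
      (PySem.List.pyGetD expr_molecs i []).foldl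
        (fun d kv =>
          if d.contains kv.1 then
            d.insert kv.1 (d.getD kv.1 0 + kv.2 * PySem.List.pyGetD expr_coeffs i 0)
          else
            d.insert kv.1 (kv.2 * PySem.List.pyGetD expr_coeffs i 0))
        d)
    (PySem.Dict.empty : PySem.Dict String Int)).items

-- ===== PORT B =====
-- elems = dict.fromkeys(k for m in expr_molecs for k in m)  — ordered dedup
-- {e: sum(m.get(e, 0) * c for c, m in zip(expr_coeffs, expr_molecs)) for e in elems}
def expression_formula_alt (expr_coeffs : List Int) (expr_molecs : List (List (String × Int))) : List (String × Int) :=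
  (PySem.List.dedup (expr_molecs.flatMap (fun m => m.map Prod.fst))).map
    (fun e => (e, ((expr_coeffs.zip expr_molecs).map
                    (fun p => (PySem.Dict.mk p.2).getD e 0 * p.1)).sum))

-- ===== PRECONDITION & SPEC =====
-- Pre_ excludes (1) coefficient lists shorter than the molecule list, on which A raises
-- IndexError at expr_coeffs[i], and (2) molecule association lists with duplicate keys,
-- which do not represent a Python dict (A's input molecules are dicts).
def Pre_expression_formula (expr_coeffs : List Int) (expr_molecs : List (List (String × Int))) : Prop :=
  expr_molecs.length ≤ expr_coeffs.length ∧ ∀ m ∈ expr_molecs, (m.map Prod.fst).Nodup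
instance (expr_coeffs : List Int) (expr_molecs : List (List (String × Int))) : Decidable (Pre_expression_formula expr_coeffs expr_molecs) := by unfold Pre_expression_formula; infer_instance

def pvWitness_expression_formula : List Int × (List (List (String × Int))) :=
  ([2, 1, 5], [[("Na", 1), ("Cl", 1)], [("H", 2)], [("Na", 1), ("F", 1)]])

def Spec_expression_formula (expr_coeffs : List Int) (expr_molecs : List (List (String × Int))) (out : List (String × Int)) : Prop := out = expression_formula_alt expr_coeffs expr_molecs
instance (expr_coeffs : List Int) (expr_molecs : List (List (String × Int))) (out : List (String × Int)) : Decidable (Spec_expression_formula expr_coeffs expr_molecs out) := by unfold Spec_expression_formula; infer_instance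

-- ===== CLAIM (what is proved, stated in full; the proofs are below) =====
def Claim_equal_expression_formula : Prop := ∀ (expr_coeffs : List Int) (expr_molecs : List (List (String × Int))), Dom_expression_formula expr_coeffs expr_molecs → Pre_expression_formula expr_coeffs expr_molecs → Spec_expression_formula expr_coeffs expr_molecs (expression_formula expr_coeffs expr_molecs)

-- ===== LEMMAS AND PROOFS =====

-- A's branch collapses: when the key is absent its stored value is 0, so both branches insert old + v*c.
theorem pvStep_collapse (d : PySem.Dict String Int) (kv : String × Int) (c : Int) :
    (if d.contains kv.1 then d.insert kv.1 (d.getD kv.1 0 + kv.2 * c)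
     else d.insert kv.1 (kv.2 * c))
    = d.insert kv.1 (d.getD kv.1 0 + kv.2 * c) := by
  by_cases h : d.contains kv.1
  · simp [h]
  · have h' : d.contains kv.1 = false := by simpa using h
    rw [PySem.Dict.getD_of_not_contains d 0 h']
    simp [h']

-- index loop over range(len ms) reading ms[i], cs[i] = loop over zip cs ms
theorem pvFoldRangeZip {γ : Type} (g : γ → List (String × Int) → Int → γ)
    (cs : List Int) (ms : List (List (String × Int))) (h : ms.length ≤ cs.length) (init : γ) :
    (List.range ms.length).foldl (fun d i => g d (ms.getD i []) (cs.getD i 0)) init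
    = (cs.zip ms).foldl (fun d p => g d p.2 p.1) init := by
  induction ms generalizing cs init with
  | nil => simp
  | cons m ms ih =>
    cases cs with
    | nil => simp at h
    | cons c cs =>
      simp only [List.length_cons, List.range_succ_eq_map, List.foldl_cons, List.foldl_map,
        List.getD_cons_zero, List.getD_cons_succ, List.zip_cons_cons]
      exact ih cs (by simpa using h) _

-- inner loop over one molecule (distinct keys): every lookup gains m's value times c
theorem pvInnerGetD (m : List (String × Int)) (hm : (m.map Prod.fst).Nodup)
    (d : PySem.Dict String Int) (c : Int) (k : String) :
    (m.foldl (fun d kv => d.insert kv.1 (d.getD kv.1 0 + kv.2 * c)) d).getD k 0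
    = d.getD k 0 + (PySem.Dict.mk m).getD k 0 * c := by
  induction m generalizing d with
  | nil =>
    have h0 : (PySem.Dict.mk ([] : List (String × Int))).getD k 0 = 0 := rfl
    simp [h0]
  | cons kv rest ih =>
    have hrest : (rest.map Prod.fst).Nodup := (List.nodup_cons.mp (by simpa using hm)).2
    have hk1 : kv.1 ∉ rest.map Prod.fst := (List.nodup_cons.mp (by simpa using hm)).1
    simp only [List.foldl_cons]
    rw [ih hrest, PySem.Dict.getD_insert,
        PySem.Dict.getD_eq_get?_getD (PySem.Dict.mk (kv :: rest)), PySem.Dict.get?_mk_cons]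
    by_cases hkk : k = kv.1
    · have hnone : (PySem.Dict.mk rest).get? k = none := by
        rw [PySem.Dict.get?_eq_none_iff_not_mem_keys]
        simpa [hkk] using hk1
      rw [PySem.Dict.getD_eq_get?_getD (PySem.Dict.mk rest), hnone]
      simp [hkk]
    · rw [PySem.Dict.getD_eq_get?_getD (PySem.Dict.mk rest)]
      simp [hkk, Ne.symm hkk]

-- inner loop keys: the molecule's keys are appended (as a set update)
theorem pvInnerKeys (m : List (String × Int)) (d : PySem.Dict String Int) (c : Int) :
    (m.foldl (fun d kv => d.insert kv.1 (d.getD kv.1 0 + kv.2 * c)) d).keys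
    = PySem.Set.update d.keys (m.map Prod.fst) := by
  exact PySem.Dict.keys_foldl_insert_key m Prod.fst (fun d kv => d.getD kv.1 0 + kv.2 * c) d

-- outer loop over the (coeff, molecule) pairs: value at any key
theorem pvOuterGetD (pairs : List (Int × List (String × Int)))
    (hnd : ∀ p ∈ pairs, (p.2.map Prod.fst).Nodup)
    (d : PySem.Dict String Int) (k : String) :
    (pairs.foldl (fun d p => p.2.foldl (fun d kv => d.insert kv.1 (d.getD kv.1 0 + kv.2 * p.1)) d) d).getD k 0
    = d.getD k 0 + (pairs.map (fun p => (PySem.Dict.mk p.2).getD k 0 * p.1)).sum := by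
  induction pairs generalizing d with
  | nil => simp
  | cons p ps ih =>
    simp only [List.foldl_cons, List.map_cons, List.sum_cons]
    rw [ih (fun q hq => hnd q (List.mem_cons_of_mem _ hq)),
        pvInnerGetD p.2 (hnd p (List.mem_cons_self)) d p.1 k]
    ring

-- outer loop keys
theorem pvOuterKeys (pairs : List (Int × List (String × Int))) (d : PySem.Dict String Int) :
    (pairs.foldl (fun d p => p.2.foldl (fun d kv => d.insert kv.1 (d.getD kv.1 0 + kv.2 * p.1)) d) d).keys
    = PySem.Set.update d.keys (pairs.flatMap (fun p => p.2.map Prod.fst)) := by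
  induction pairs generalizing d with
  | nil => simp
  | cons p ps ih =>
    simp only [List.foldl_cons, List.flatMap_cons]
    rw [ih, pvInnerKeys, PySem.Set.update_append]

theorem pvOuterNodupKeys (pairs : List (Int × List (String × Int))) (d : PySem.Dict String Int)
    (h : d.keys.Nodup) :
    (pairs.foldl (fun d p => p.2.foldl (fun d kv => d.insert kv.1 (d.getD kv.1 0 + kv.2 * p.1)) d) d).keys.Nodup := by
  induction pairs generalizing d with
  | nil => exact h
  | cons p ps ih =>
    simp only [List.foldl_cons]
    exact ih _ (PySem.Dict.nodup_keys_foldl_insert_key p.2 Prod.fst _ d h)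

-- ===== VERDICT (by name: the statement is the Claim_ definition above) =====
theorem expression_formula_spec : Claim_equal_expression_formula := by
  intro cs ms _ hpre
  obtain ⟨hlen, hnd⟩ := hpre
  show expression_formula cs ms = expression_formula_alt cs ms
  unfold expression_formula
  -- rewrite A's branch and turn the index loop into a loop over zip cs ms
  have hstep :
      (PySem.List.pyRange 0 ms.length 1).foldl
        (fun d i =>
          (PySem.List.pyGetD ms i []).foldl
            (fun d kv =>
              if d.contains kv.1 then
                d.insert kv.1 (d.getD kv.1 0 + kv.2 * PySem.List.pyGetD cs i 0)
              else
                d.insert kv.1 (kv.2 * PySem.List.pyGetD cs i 0))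
            d)
        (PySem.Dict.empty : PySem.Dict String Int)
      = (cs.zip ms).foldl
          (fun d p => p.2.foldl (fun d kv => d.insert kv.1 (d.getD kv.1 0 + kv.2 * p.1)) d)
          (PySem.Dict.empty : PySem.Dict String Int) := by
    rw [PySem.List.pyRange_zero_nat, List.foldl_map]
    simp only [pvStep_collapse, PySem.List.pyGetD_natCast]
    exact pvFoldRangeZip (fun (d : PySem.Dict String Int) m c => m.foldl (fun d kv => d.insert kv.1 (d.getD kv.1 0 + kv.2 * c)) d) cs ms hlen _
  rw [hstep]
  -- both sides are the key list paired with the per-key totals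
  have hndp : ∀ p ∈ cs.zip ms, (p.2.map Prod.fst).Nodup := by
    intro p hp
    exact hnd p.2 (List.of_mem_zip hp).2
  rw [PySem.Dict.items_eq_map_keys _ (pvOuterNodupKeys _ _ (by simp [PySem.Dict.keys_empty])) 0]
  rw [pvOuterKeys]
  unfold expression_formula_alt
  rw [PySem.List.dedup_eq_ofList]
  have hkeys : PySem.Set.update (PySem.Dict.empty : PySem.Dict String Int).keys
      ((cs.zip ms).flatMap (fun p => p.2.map Prod.fst))
      = PySem.Set.ofList (ms.flatMap (fun m => m.map Prod.fst)) := by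
    have hsnd : (cs.zip ms).map Prod.snd = ms := List.map_snd_zip hlen
    calc PySem.Set.update (PySem.Dict.empty : PySem.Dict String Int).keys
          ((cs.zip ms).flatMap (fun p => p.2.map Prod.fst))
        = PySem.Set.ofList (((cs.zip ms).map Prod.snd).flatMap (fun m => m.map Prod.fst)) := by
          simp only [List.flatMap_map, PySem.Dict.keys_empty]
          exact PySem.Set.update_empty _
      _ = PySem.Set.ofList (ms.flatMap (fun m => m.map Prod.fst)) := by rw [hsnd]
  rw [hkeys]
  apply List.map_congr_left
  intro k hk
  rw [pvOuterGetD _ hndp _ k]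
  simp
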